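-- pv_equiv track=rewrite | github.com/HatmanStack/RAGStack-Lambda | lib/ragstack_common/text_extractors/csv_extractor.py | _get_sample_values
-- ===== SOURCE A (Python) =====
-- def _get_sample_values(
--     data_rows: list[list[str]], headers: list[str]
-- ) -> dict[str, list[str]]:
--     """Get sample values for each column."""
--     samples: dict[str, list[str]] = {}
--     for i, header in enumerate(headers):
--         values = []
--         seen: set[str] = set()
--         for row in data_rows:
--             if i < len(row) and row[i].strip() and row[i] not in seen:
--                 values.append(row[i])
--                 seen.add(row[i])
--             if len(values) >= 3:
--                 break
--         samples[header] = values
--     return samples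
-- ===== SOURCE B (Python) =====
-- def _get_sample_values(
--     data_rows: list[list[str]], headers: list[str]
-- ) -> dict[str, list[str]]:
--     """Get sample values for each column (single row-major pass)."""
--     cols = [([], set()) for _ in headers]
--     for row in data_rows:
--         for i, (vals, seen) in enumerate(cols):
--             if len(vals) < 3 and i < len(row):
--                 cell = row[i]
--                 if cell.strip() and cell not in seen:
--                     vals.append(cell)
--                     seen.add(cell)
--     return {h: cols[i][0] for i, h in enumerate(headers)}
-- ===== Notes on version B (the rewrite author's own statement) =====
-- stated objective: alternative
-- what changed: Replaced the per-column loop over all rows (with an early break at 3 samples) by a single row-major pass that maintains a (values, seen-set) accumulator per column index, then builds the dict from enumerate(headers) so duplicate headers still get the last index's values.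
import Mathlib
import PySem

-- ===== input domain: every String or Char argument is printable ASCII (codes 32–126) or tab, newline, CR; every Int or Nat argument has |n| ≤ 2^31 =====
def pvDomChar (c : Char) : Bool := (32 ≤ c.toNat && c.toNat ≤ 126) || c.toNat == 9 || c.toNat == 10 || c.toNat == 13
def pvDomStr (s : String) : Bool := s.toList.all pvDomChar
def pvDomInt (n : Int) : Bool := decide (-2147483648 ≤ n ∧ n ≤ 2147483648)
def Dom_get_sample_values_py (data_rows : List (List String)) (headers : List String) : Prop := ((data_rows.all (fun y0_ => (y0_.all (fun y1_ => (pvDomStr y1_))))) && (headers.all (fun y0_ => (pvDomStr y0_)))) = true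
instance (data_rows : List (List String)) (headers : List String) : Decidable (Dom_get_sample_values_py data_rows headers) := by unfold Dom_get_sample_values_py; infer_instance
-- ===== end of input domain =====

-- B replaces A's per-column scan (with break at 3) by one row-major pass over the data
-- with a (values, seen) accumulator per column index: an alternative decomposition, same cost.


-- ===== PORT A =====
-- one iteration of A's inner 'for row in data_rows' body (the part before the break test)
def aStep (i : Int) (row : List String) (p : List String × PySem.Set String) :
    List String × PySem.Set String :=
  if i < PySem.List.len row ∧
     PySem.Str.strip (PySem.List.pyGetD row i "") ≠ "" ∧
     PySem.List.pyGetD row i "" ∉ p.2 then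
    (p.1 ++ [PySem.List.pyGetD row i ""], PySem.Set.add p.2 (PySem.List.pyGetD row i ""))
  else p

-- A's inner loop over data_rows, with the 'if len(values) >= 3: break'
def aLoop (i : Int) (rows : List (List String)) (values : List String)
    (seen : PySem.Set String) : List String :=
  match rows with
  | [] => values
  | row :: rest =>
    let p := aStep i row (values, seen)
    if 3 ≤ p.1.length then p.1 else aLoop i rest p.1 p.2

def get_sample_values_py (data_rows : List (List String)) (headers : List String) :
    List (String × List String) :=
  ((PySem.List.enumerate headers).foldl
    (fun d p => d.insert p.2 (aLoop p.1 data_rows [] PySem.Set.empty))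
    PySem.Dict.empty).items

-- ===== PORT B =====
-- B's inner body: update column i's accumulator from this row
def bColStep (row : List String) (i : Nat) (p : List String × PySem.Set String) :
    List String × PySem.Set String :=
  if p.1.length < 3 then
    match row[i]? with
    | some cell =>
      if PySem.Str.strip cell ≠ "" ∧ cell ∉ p.2 then
        (p.1 ++ [cell], PySem.Set.add p.2 cell)
      else p
    | none => p
  else p

def get_sample_values_py_alt (data_rows : List (List String)) (headers : List String) :
    List (String × List String) :=
  let cols := data_rows.foldl
    (fun st row => st.mapIdx (fun i p => bColStep row i p))
    (headers.map fun _ => (([] : List String), (PySem.Set.empty : PySem.Set String)))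
  ((PySem.List.enumerate headers).foldl
    (fun d p => d.insert p.2 (PySem.List.pyGetD cols p.1 ([], PySem.Set.empty)).1)
    PySem.Dict.empty).items

-- ===== PRECONDITION & SPEC =====
def Spec_get_sample_values_py (data_rows : List (List String)) (headers : List String) (out : List (String × List String)) : Prop := out = get_sample_values_py_alt data_rows headers
instance (data_rows : List (List String)) (headers : List String) (out : List (String × List String)) : Decidable (Spec_get_sample_values_py data_rows headers out) := by unfold Spec_get_sample_values_py; infer_instance

-- ===== CLAIM (what is proved, stated in full; the proofs are below) =====
def Claim_equal_get_sample_values_py : Prop := ∀ (data_rows : List (List String)) (headers : List String), Dom_get_sample_values_py data_rows headers → Spec_get_sample_values_py data_rows headers (get_sample_values_py data_rows headers)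

-- ===== LEMMAS AND PROOFS =====

-- once a column has 3 values, B's step is the identity
theorem bColStep_frozen (k : Nat) (rows : List (List String))
    (p : List String × PySem.Set String) (h : 3 ≤ p.1.length) :
    rows.foldl (fun p row => bColStep row k p) p = p := by
  induction rows with
  | nil => rfl
  | cons row rest ih =>
    simp only [List.foldl_cons]
    have : bColStep row k p = p := by
      unfold bColStep
      simp [Nat.not_lt.mpr h]
    rw [this, ih]

-- below 3 values, B's step coincides with A's step
theorem bColStep_eq_aStep (k : Nat) (row : List String)
    (p : List String × PySem.Set String) (h : p.1.length < 3) :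
    bColStep row k p = aStep (k : Int) row p := by
  unfold bColStep aStep
  by_cases hk : k < row.length
  · have hg : row[k]? = some row[k] := List.getElem?_eq_getElem hk
    have hd : PySem.List.pyGetD row (k : Int) "" = row[k] := by
      simp [PySem.List.pyGetD_natCast, List.getD_eq_getElem?_getD, hg]
    have hlen : ((k : Int) < PySem.List.len row) := by
      simp [PySem.List.len_eq]; exact_mod_cast hk
    simp [h, hd, hk]
  · have hg : row[k]? = none := List.getElem?_eq_none (Nat.le_of_not_lt hk)
    have hlen : ¬ ((k : Int) < PySem.List.len row) := by
      simp [PySem.List.len_eq]; exact_mod_cast Nat.le_of_not_lt hk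
    simp [h, hk]

-- A's break-loop on one column equals B's guarded fold on that column
theorem aLoop_eq_foldl (k : Nat) (rows : List (List String)) :
    ∀ (v : List String) (s : PySem.Set String), v.length < 3 →
    aLoop (k : Int) rows v s = (rows.foldl (fun p row => bColStep row k p) (v, s)).1 := by
  induction rows with
  | nil => intro v s _; rfl
  | cons row rest ih =>
    intro v s hv
    have hstep : bColStep row k (v, s) = aStep (k : Int) row (v, s) :=
      bColStep_eq_aStep k row (v, s) hv
    simp only [List.foldl_cons, aLoop, hstep]
    by_cases hbr : 3 ≤ (aStep (k : Int) row (v, s)).1.length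
    · rw [bColStep_frozen k rest _ hbr]
      simp [hbr]
    · rw [if_neg hbr, ih _ _ (Nat.lt_of_not_le hbr)]

-- the k-th accumulator of B's row-major fold is the single-column fold
theorem foldl_mapIdx_getD (rows : List (List String)) :
    ∀ (init : List (List String × PySem.Set String)) (k : Nat), k < init.length →
    (rows.foldl (fun st row => st.mapIdx (fun i p => bColStep row i p)) init).getD k
        ([], PySem.Set.empty)
      = rows.foldl (fun p row => bColStep row k p) (init.getD k ([], PySem.Set.empty)) := by
  induction rows with
  | nil => intro init k hk; rfl
  | cons row rest ih =>
    intro init k hk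
    simp only [List.foldl_cons]
    have hk' : k < (init.mapIdx (fun i p => bColStep row i p)).length := by
      simpa using hk
    rw [ih _ k hk']
    have : (init.mapIdx (fun i p => bColStep row i p)).getD k ([], PySem.Set.empty)
        = bColStep row k (init.getD k ([], PySem.Set.empty)) := by
      rw [List.getD_eq_getElem _ _ hk', List.getD_eq_getElem _ _ hk, List.getElem_mapIdx]
    rw [this]

-- ===== VERDICT (by name: the statement is the Claim_ definition above) =====
theorem get_sample_values_py_spec : Claim_equal_get_sample_values_py := by
  intro data_rows headers _
  unfold Spec_get_sample_values_py get_sample_values_py get_sample_values_py_alt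
  congr 1
  apply PySem.List.foldl_congr_mem
  intro d p hp
  rcases (PySem.List.mem_enumerate_iff _ _ _).1 hp with ⟨k, hk, hpk⟩
  subst hpk
  congr 1
  have hlen : k < (headers.map fun _ =>
      (([] : List String), (PySem.Set.empty : PySem.Set String))).length := by
    simpa using hk
  have hinit : (headers.map fun _ =>
      (([] : List String), (PySem.Set.empty : PySem.Set String))).getD k ([], PySem.Set.empty)
      = ([], PySem.Set.empty) := by
    rw [List.getD_eq_getElem _ _ hlen, List.getElem_map]
  have h0k : ((0 : Int) + (k : Int)) = (k : Int) := by omega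
  rw [h0k, PySem.List.pyGetD_natCast, foldl_mapIdx_getD _ _ k hlen, hinit,
    aLoop_eq_foldl k data_rows [] PySem.Set.empty (by simp)]
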